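-- pv_equiv track=rewrite | github.com/LeanVibe/agent-hive | .worktree-archive/phase2-legacy-20250718/archived-worktrees/frontend-Jul-17-1438/feedback_monitoring.py | _check_completion_signals
-- ===== SOURCE A (Python) =====
-- from typing import Dict, List, Optional, Tuple
--
-- def _check_completion_signals(comments: List[str]) -> Dict[str, bool]:
--     """Check for completion signals in issue comments"""
--     signals = {
--         'review_complete': False,
--         'implementation_ready': False,
--         'changes_implemented': False,
--         'validation_needed': False,
--         'approved': False,
--         'merge_ready': False
--     }
--
--     for comment in comments:
--         comment_lower = comment.lower()
--         if '@review-complete' in comment_lower: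
--             signals['review_complete'] = True
--         if '@implementation-ready' in comment_lower:
--             signals['implementation_ready'] = True
--         if '@changes-implemented' in comment_lower:
--             signals['changes_implemented'] = True
--         if '@validation-needed' in comment_lower:
--             signals['validation_needed'] = True
--         if '@approved' in comment_lower:
--             signals['approved'] = True
--         if '@merge-ready' in comment_lower:
--             signals['merge_ready'] = True
--
--     return signals
-- ===== SOURCE B (Python) =====
-- from typing import Dict, List, Optional, Tuple
--
-- _SIGNAL_MARKERS = [
--     ('review_complete', '@review-complete'),
--     ('implementation_ready', '@implementation-ready'),
--     ('changes_implemented', '@changes-implemented'),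
--     ('validation_needed', '@validation-needed'),
--     ('approved', '@approved'),
--     ('merge_ready', '@merge-ready'),
-- ]
--
-- def _check_completion_signals(comments: List[str]) -> Dict[str, bool]:
--     """Check for completion signals in issue comments"""
--     lowered = [c.lower() for c in comments]
--     return {key: any(marker in c for c in lowered)
--             for key, marker in _SIGNAL_MARKERS}
-- ===== Notes on version B (the rewrite author's own statement) =====
-- stated objective: idiomatic
-- what changed: Replaced the per-comment loop that mutates six hard-coded flags with a table of (key, marker) pairs and a dict comprehension doing one per-signal any() scan over the pre-lowered comments.
import Mathlib
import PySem

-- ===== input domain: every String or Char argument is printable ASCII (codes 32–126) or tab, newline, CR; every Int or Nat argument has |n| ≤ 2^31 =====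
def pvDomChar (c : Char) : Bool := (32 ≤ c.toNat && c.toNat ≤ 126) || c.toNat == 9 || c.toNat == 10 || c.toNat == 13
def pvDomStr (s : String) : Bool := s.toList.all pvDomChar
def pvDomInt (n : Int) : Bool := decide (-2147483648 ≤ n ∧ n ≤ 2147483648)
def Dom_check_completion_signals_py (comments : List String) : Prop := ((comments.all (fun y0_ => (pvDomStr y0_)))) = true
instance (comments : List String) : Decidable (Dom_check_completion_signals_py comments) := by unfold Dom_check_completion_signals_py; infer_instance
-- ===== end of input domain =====

-- B replaces A's per-comment loop mutating six hard-coded flags by a table-driven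
-- per-signal any() scan over the lowered comments (idiomatic decomposition, same cost).


-- ===== PORT A =====
def check_completion_signals_py (comments : List String) : List (String × Bool) :=
  let signals : PySem.Dict String Bool := PySem.Dict.mk
    [("review_complete", false), ("implementation_ready", false),
     ("changes_implemented", false), ("validation_needed", false),
     ("approved", false), ("merge_ready", false)]
  let signals := comments.foldl (fun signals comment =>
    let comment_lower := PySem.Str.lower comment
    let signals := if PySem.Str.isIn "@review-complete" comment_lower then signals.insert "review_complete" true else signals
    let signals := if PySem.Str.isIn "@implementation-ready" comment_lower then signals.insert "implementation_ready" true else signals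
    let signals := if PySem.Str.isIn "@changes-implemented" comment_lower then signals.insert "changes_implemented" true else signals
    let signals := if PySem.Str.isIn "@validation-needed" comment_lower then signals.insert "validation_needed" true else signals
    let signals := if PySem.Str.isIn "@approved" comment_lower then signals.insert "approved" true else signals
    let signals := if PySem.Str.isIn "@merge-ready" comment_lower then signals.insert "merge_ready" true else signals
    signals) signals
  signals.items

-- ===== PORT B =====
def pvSignalMarkers : List (String × String) :=
  [("review_complete", "@review-complete"),
   ("implementation_ready", "@implementation-ready"),
   ("changes_implemented", "@changes-implemented"),
   ("validation_needed", "@validation-needed"),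
   ("approved", "@approved"),
   ("merge_ready", "@merge-ready")]

def check_completion_signals_py_alt (comments : List String) : List (String × Bool) :=
  let lowered := comments.map (fun c => PySem.Str.lower c)
  pvSignalMarkers.map (fun km => (km.1, lowered.any (fun c => PySem.Str.isIn km.2 c)))

-- ===== PRECONDITION & SPEC =====
def Spec_check_completion_signals_py (comments : List String) (out : List (String × Bool)) : Prop := out = check_completion_signals_py_alt comments
instance (comments : List String) (out : List (String × Bool)) : Decidable (Spec_check_completion_signals_py comments out) := by unfold Spec_check_completion_signals_py; infer_instance

-- ===== CLAIM (what is proved, stated in full; the proofs are below) =====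
def Claim_equal_check_completion_signals_py : Prop := ∀ (comments : List String), Dom_check_completion_signals_py comments → Spec_check_completion_signals_py comments (check_completion_signals_py comments)

-- ===== LEMMAS AND PROOFS =====

-- Loop invariant: A's fold over any starting flag values yields, per key, old-flag OR "some comment contains the marker".
theorem pvFoldA (comments : List String) (b1 b2 b3 b4 b5 b6 : Bool) :
    comments.foldl (fun signals comment =>
      let comment_lower := PySem.Str.lower comment
      let signals := if PySem.Str.isIn "@review-complete" comment_lower then signals.insert "review_complete" true else signals
      let signals := if PySem.Str.isIn "@implementation-ready" comment_lower then signals.insert "implementation_ready" true else signals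
      let signals := if PySem.Str.isIn "@changes-implemented" comment_lower then signals.insert "changes_implemented" true else signals
      let signals := if PySem.Str.isIn "@validation-needed" comment_lower then signals.insert "validation_needed" true else signals
      let signals := if PySem.Str.isIn "@approved" comment_lower then signals.insert "approved" true else signals
      let signals := if PySem.Str.isIn "@merge-ready" comment_lower then signals.insert "merge_ready" true else signals
      signals)
      (PySem.Dict.mk [("review_complete", b1), ("implementation_ready", b2),
        ("changes_implemented", b3), ("validation_needed", b4),
        ("approved", b5), ("merge_ready", b6)]) =
    PySem.Dict.mk
      [("review_complete", b1 || comments.any (fun c => PySem.Str.isIn "@review-complete" (PySem.Str.lower c))),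
       ("implementation_ready", b2 || comments.any (fun c => PySem.Str.isIn "@implementation-ready" (PySem.Str.lower c))),
       ("changes_implemented", b3 || comments.any (fun c => PySem.Str.isIn "@changes-implemented" (PySem.Str.lower c))),
       ("validation_needed", b4 || comments.any (fun c => PySem.Str.isIn "@validation-needed" (PySem.Str.lower c))),
       ("approved", b5 || comments.any (fun c => PySem.Str.isIn "@approved" (PySem.Str.lower c))),
       ("merge_ready", b6 || comments.any (fun c => PySem.Str.isIn "@merge-ready" (PySem.Str.lower c)))] := by
  induction comments generalizing b1 b2 b3 b4 b5 b6 with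
  | nil => simp
  | cons c cs ih =>
    rw [List.foldl_cons]
    have hstep : ∀ (a1 a2 a3 a4 a5 a6 : Bool),
        (let comment_lower := PySem.Str.lower c
         let signals := PySem.Dict.mk [("review_complete", a1), ("implementation_ready", a2),
           ("changes_implemented", a3), ("validation_needed", a4), ("approved", a5), ("merge_ready", a6)]
         let signals := if PySem.Str.isIn "@review-complete" comment_lower then signals.insert "review_complete" true else signals
         let signals := if PySem.Str.isIn "@implementation-ready" comment_lower then signals.insert "implementation_ready" true else signals
         let signals := if PySem.Str.isIn "@changes-implemented" comment_lower then signals.insert "changes_implemented" true else signals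
         let signals := if PySem.Str.isIn "@validation-needed" comment_lower then signals.insert "validation_needed" true else signals
         let signals := if PySem.Str.isIn "@approved" comment_lower then signals.insert "approved" true else signals
         let signals := if PySem.Str.isIn "@merge-ready" comment_lower then signals.insert "merge_ready" true else signals
         signals) =
        PySem.Dict.mk [("review_complete", a1 || PySem.Str.isIn "@review-complete" (PySem.Str.lower c)),
          ("implementation_ready", a2 || PySem.Str.isIn "@implementation-ready" (PySem.Str.lower c)),
          ("changes_implemented", a3 || PySem.Str.isIn "@changes-implemented" (PySem.Str.lower c)),
          ("validation_needed", a4 || PySem.Str.isIn "@validation-needed" (PySem.Str.lower c)),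
          ("approved", a5 || PySem.Str.isIn "@approved" (PySem.Str.lower c)),
          ("merge_ready", a6 || PySem.Str.isIn "@merge-ready" (PySem.Str.lower c))] := by
      intro a1 a2 a3 a4 a5 a6
      simp only []
      cases PySem.Str.isIn "@review-complete" (PySem.Str.lower c) <;>
      cases PySem.Str.isIn "@implementation-ready" (PySem.Str.lower c) <;>
      cases PySem.Str.isIn "@changes-implemented" (PySem.Str.lower c) <;>
      cases PySem.Str.isIn "@validation-needed" (PySem.Str.lower c) <;>
      cases PySem.Str.isIn "@approved" (PySem.Str.lower c) <;>
      cases PySem.Str.isIn "@merge-ready" (PySem.Str.lower c) <;>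
        simp [PySem.Dict.insert]
    rw [hstep, ih]
    simp [List.any_cons, Bool.or_assoc]

-- ===== VERDICT (by name: the statement is the Claim_ definition above) =====
theorem check_completion_signals_py_spec : Claim_equal_check_completion_signals_py := by
  intro comments _
  show _ = _
  rw [check_completion_signals_py, check_completion_signals_py_alt,
    pvFoldA comments false false false false false false]
  simp [pvSignalMarkers, Function.comp_def, PySem.Str.toList_lower]
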